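/- GENERATED by mk_final_copies.py from the proof of the farm's unit `vorbis_validate` (farm:vorbis_validate.1: Proof.lean) as the
   re-elaboration sweep compiled it — do not edit. -/
import Vorbis.Spec.Units.vorbis_validate

open X86 X86.User Asan Vorbis

set_option maxRecDepth 4000
set_option maxHeartbeats 4000000

/-- `vorbis_validate` satisfies its contract: `sub rsp, 8`, the call `memcmp(data, vorbis, 6)`, `test ; sete ; movzx`,
`add rsp, 8 ; ret`. -/
theorem Vorbis.Spec.Worked.vorbis_validate_ok : Vorbis.Spec.vorbis_validate.Statement := by
  intro Lay hLay μ hμ u₀ hcode hmc others frames u ret he hpre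
  v_entry he
  have hmc' := hmc others frames
  obtain ⟨hsh, hdata, hglob⟩ := hpre
  u_walk hcode [hμ.vendor] span [Vorbis.L.textLo, Vorbis.L.textHi] side (v_side)
  · -- call_inv: DF and the MXCSR masks at memcmp's entry
    v_inv
  · -- memcmp's precondition: `memcmp(data, vorbis, 6)`, both ranges live
    have c_rdi : s_10b8ee.reg .rdi = u.reg .rdi := w_kept.get .rdi rfl
    have c_rdx : (s_10b8ee.reg .rdx).toNat = 6 := by
      rw [w_rdx]
      rfl
    have c_rsi : (s_10b8ee.reg .rsi).toNat = Vorbis.Globals.vorbis.beg := by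
      rw [w_rsi]
      rfl
    refine ⟨?_, Or.inr ⟨?_, ?_⟩⟩
    · show ShadowPre others frames s_10b8ee
      refine hsh.callee ?_ ?_ ?_ ?_
      · v_untouched
      · rw [w_rsp]
        u_omega
      · rw [w_rsp]
        u_omega
      · rw [w_rsp]
        u_omega
    · rw [c_rdi, c_rdx]
      exact hdata
    · rw [c_rsi, c_rdx]
      exact hglob
  · -- 0x10b8f3, after the return of memcmp (stb_vorbis_fixed.c:1263)
    v_after_call w_rsp_10b8ee w_mem_10b8ee
    have hs0 : UInt64.ofNat (s_10b8eer.mem.readLE (u.reg .rsp) 8) = ret := by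
      u_frame he_retAddr
    u_walk hcode [hμ.vendor] span [Vorbis.L.textLo, Vorbis.L.textHi] side (v_side)
    -- 0x10b8ff, `ret` (stb_vorbis_fixed.c:1264): the contract's `Returned`
    refine ReachVia.done ?_
    v_returned
    refine ⟨?_, ?_⟩
    · -- eax ∈ {0, 1}: `sete al ; movzx eax, al`
      rw [w_rax]
      split
      · exact Or.inr rfl
      · exact Or.inl rfl
    · -- no store went to the shadow: ours (the return address of the call) and memcmp's (its post)
      show ShadowUntouched u.mem s_10b8ff.mem
      v_untouched
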